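-- pv_equiv track=rewrite | github.com/Deeplearn-PeD/EpidBot-OpenMAIC | src/generators/requirement_builder.py | _format_weekly_data
-- ===== SOURCE A (Python) =====
-- def _format_weekly_data(weekly: dict[int, int]) -> str:
--     """
--     Format weekly data as a markdown table.
--
--     Args:
--         weekly: Dictionary mapping week numbers to case counts
--
--     Returns:
--         Markdown-formatted table string
--     """
--     if not weekly:
--         return "Dados semanais não disponíveis"
--
--     lines = ["| Semana Epidemiológica | Casos |", "|:---------------------:|:-----:|"]
--
--     sorted_weeks = sorted(weekly.items())
--     recent_weeks = sorted_weeks[-8:] if len(sorted_weeks) > 8 else sorted_weeks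
--
--     for week, cases in recent_weeks:
--         lines.append(f"| {week} | {cases:,} |")
--
--     return "\n".join(lines)
-- ===== SOURCE B (Python) =====
-- def _format_weekly_data(weekly: dict[int, int]) -> str:
--     """Format the most recent 8 weeks as a markdown table."""
--     if not weekly:
--         return "Dados semanais não disponíveis"
--
--     # keep an ascending buffer of the (at most) 8 largest (week, cases) pairs,
--     # inserting each item in place instead of sorting everything
--     top = []
--     for item in weekly.items():
--         i = 0
--         while i < len(top) and top[i] < item:
--             i += 1
--         top.insert(i, item)
--         if len(top) > 8:
--             del top[0]
--
--     header = ["| Semana Epidemiológica | Casos |",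
--               "|:---------------------:|:-----:|"]
--     rows = [f"| {week} | {cases:,} |" for week, cases in top]
--     return "\n".join(header + rows)
-- ===== Notes on version B (the rewrite author's own statement) =====
-- stated objective: faster
-- what changed: Replaces the full sort of all weeks followed by the [-8:] slice with a single pass that keeps an ascending in-place buffer of at most the 8 largest (week, cases) pairs, so no full sort is performed.
import Mathlib
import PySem

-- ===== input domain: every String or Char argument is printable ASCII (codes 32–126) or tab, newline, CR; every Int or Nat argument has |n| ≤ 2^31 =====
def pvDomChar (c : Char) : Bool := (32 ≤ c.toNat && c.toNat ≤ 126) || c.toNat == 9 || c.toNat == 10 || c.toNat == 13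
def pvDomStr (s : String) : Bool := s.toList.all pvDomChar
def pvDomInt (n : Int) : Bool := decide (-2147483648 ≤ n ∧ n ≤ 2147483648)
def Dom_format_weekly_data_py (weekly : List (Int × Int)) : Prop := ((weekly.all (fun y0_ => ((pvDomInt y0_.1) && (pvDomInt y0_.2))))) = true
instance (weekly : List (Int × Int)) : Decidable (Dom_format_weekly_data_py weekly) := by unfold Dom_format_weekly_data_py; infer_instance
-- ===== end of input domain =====

-- B replaces the full sort + [-8:] slice by a single pass keeping an ascending in-place buffer of the (at most) 8 largest items.

-- ===== PORT A =====
-- f"{n:,}" for an int: decimal digits grouped in threes from the right, '-' prefixed for negatives (exact for Int)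
def pvGroup3 : List Char → List Char
  | c1 :: c2 :: c3 :: c4 :: rest => c1 :: c2 :: c3 :: ',' :: pvGroup3 (c4 :: rest)
  | l => l

def pvCommaFmt (n : Int) : String :=
  let grouped := (pvGroup3 (PySem.Int.toStr (n.natAbs : Int)).toList.reverse).reverse
  if n < 0 then String.ofList ('-' :: grouped) else String.ofList grouped

-- f"| {week} | {cases:,} |"
def pvRow (p : Int × Int) : String :=
  "| " ++ PySem.Int.toStr p.1 ++ " | " ++ pvCommaFmt p.2 ++ " |"

def format_weekly_data_py (weekly : List (Int × Int)) : String :=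
  if weekly = [] then "Dados semanais não disponíveis"
  else
    let lines := ["| Semana Epidemiológica | Casos |", "|:---------------------:|:-----:|"]
    let sorted_weeks := PySem.List.sorted2 weekly Prod.fst Prod.snd
    let recent_weeks := if sorted_weeks.length > 8 then PySem.List.slice sorted_weeks (some (-8)) none else sorted_weeks
    PySem.Str.join "\n" (lines ++ recent_weeks.map pvRow)

-- ===== PORT B =====
-- Python tuple comparison on int pairs: a < b (lexicographic)
def pvLtP (a b : Int × Int) : Bool := decide (a.1 < b.1) || (decide (a.1 = b.1) && decide (a.2 < b.2))

-- the while loop "i = 0; while i < len(top) and top[i] < item: i += 1" as a scan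
def pvScanIdx (item : Int × Int) : List (Int × Int) → Nat
  | [] => 0
  | y :: ys => if pvLtP y item then pvScanIdx item ys + 1 else 0

-- one iteration of B's loop body: find the index, top.insert(i, item), then del top[0] if len > 8
def pvStep (top : List (Int × Int)) (item : Int × Int) : List (Int × Int) :=
  let t := top.insertIdx (pvScanIdx item top) item
  if t.length > 8 then t.drop 1 else t

def format_weekly_data_py_alt (weekly : List (Int × Int)) : String :=
  if weekly = [] then "Dados semanais não disponíveis"
  else
    let top := weekly.foldl pvStep []
    let rows := top.map pvRow
    PySem.Str.join "\n" (["| Semana Epidemiológica | Casos |", "|:---------------------:|:-----:|"] ++ rows)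

-- ===== PRECONDITION & SPEC =====
-- A's Python argument is a dict[int, int], whose keys are necessarily distinct; Pre_ states exactly
-- that for the association-list encoding (it excludes no input that arises from a Python dict).
def Pre_format_weekly_data_py (weekly : List (Int × Int)) : Prop := (weekly.map Prod.fst).Nodup
instance (weekly : List (Int × Int)) : Decidable (Pre_format_weekly_data_py weekly) := by unfold Pre_format_weekly_data_py; infer_instance

def pvWitness_format_weekly_data_py : (List (Int × Int)) := [(1, 1234567), (2, -4500), (3, 0)]

def Spec_format_weekly_data_py (weekly : List (Int × Int)) (out : String) : Prop := out = format_weekly_data_py_alt weekly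
instance (weekly : List (Int × Int)) (out : String) : Decidable (Spec_format_weekly_data_py weekly out) := by unfold Spec_format_weekly_data_py; infer_instance

-- ===== CLAIM (what is proved, stated in full; the proofs are below) =====
def Claim_equal_format_weekly_data_py : Prop := ∀ (weekly : List (Int × Int)), Dom_format_weekly_data_py weekly → Pre_format_weekly_data_py weekly → Spec_format_weekly_data_py weekly (format_weekly_data_py weekly)

-- ===== LEMMAS AND PROOFS =====

-- the tuple-lexicographic "strictly before" test used by sorted2 (Python's tuple <)
def pvLt2 (a b : Int × Int) : Bool :=
  decide (a.1 < b.1) || !decide (b.1 < a.1) && decide (a.2 < b.2)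

theorem sorted2_eq_foldl (xs : List (Int × Int)) :
    PySem.List.sorted2 xs Prod.fst Prod.snd =
      xs.foldl (fun acc x => PySem.List.insertBy pvLt2 x acc) [] := rfl

-- keep the last (at most) 8 elements
def pvTail8 (l : List (Int × Int)) : List (Int × Int) := l.drop (l.length - 8)

-- insertBy with congruent comparison functions
theorem insertBy_congr {α : Type} (f g : α → α → Bool) (x : α) (ys : List α)
    (h : ∀ y ∈ ys, f x y = g x y) :
    PySem.List.insertBy f x ys = PySem.List.insertBy g x ys := by
  induction ys with
  | nil => rfl
  | cons y ys ih =>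
    simp only [PySem.List.insertBy, h y (by simp)]
    rw [ih (fun z hz => h z (by simp [hz]))]

theorem foldl_insertBy_congr {α : Type} (f g : α → α → Bool) (U : List α)
    (h : ∀ a ∈ U, ∀ b ∈ U, f a b = g a b) :
    ∀ (xs acc : List α), (∀ x ∈ xs, x ∈ U) → (∀ x ∈ acc, x ∈ U) →
      xs.foldl (fun acc x => PySem.List.insertBy f x acc) acc =
      xs.foldl (fun acc x => PySem.List.insertBy g x acc) acc := by
  intro xs
  induction xs with
  | nil => intro acc _ _; rfl
  | cons x xs ih =>
    intro acc hxs hacc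
    have hx : x ∈ U := hxs x (by simp)
    simp only [List.foldl_cons]
    rw [insertBy_congr f g x acc (fun y hy => h x hx y (hacc y hy))]
    exact ih _ (fun z hz => hxs z (by simp [hz]))
      (fun z hz => by
        rcases (PySem.List.mem_insertBy g x z acc).mp hz with rfl | hz
        · exact hx
        · exact hacc z hz)

-- under distinct keys, sorting by the (key, value) tuple is sorting by the key
theorem sorted2_eq_sorted_fst (xs : List (Int × Int))
    (h : (xs.map Prod.fst).Nodup) :
    PySem.List.sorted2 xs Prod.fst Prod.snd = PySem.List.sorted xs Prod.fst := by
  have hinj := List.inj_on_of_nodup_map h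
  rw [sorted2_eq_foldl]
  show _ = xs.foldl (fun acc x => PySem.List.insertBy (fun a b => decide (a.1 < b.1)) x acc) []
  apply foldl_insertBy_congr _ _ xs _ xs [] (fun z hz => hz) (fun z hz => by simp at hz)
  intro a ha b hb
  unfold pvLt2
  by_cases hab : a.1 = b.1
  · have : a = b := hinj ha hb hab
    subst this
    simp
  · rcases lt_or_gt_of_ne hab with hlt | hgt
    · simp [hlt, not_lt.mpr (le_of_lt hlt)]
    · simp [hgt, not_lt.mpr (le_of_lt hgt)]

-- sorted2's insertion splits a key-distinct list at x's key
theorem insertBy_split (x : Int × Int) (L : List (Int × Int))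
    (hx : ∀ y ∈ L, y.1 ≠ x.1) :
    PySem.List.insertBy pvLt2 x L =
      L.takeWhile (fun y => decide (y.1 < x.1)) ++ x :: L.dropWhile (fun y => decide (y.1 < x.1)) := by
  induction L with
  | nil => rfl
  | cons y ys ih =>
    have hne : y.1 ≠ x.1 := hx y (by simp)
    by_cases hlt : y.1 < x.1
    · have hxy : pvLt2 x y = false := by
        unfold pvLt2; simp [not_lt.mpr (le_of_lt hlt), hlt]
      simp only [PySem.List.insertBy, hxy, List.takeWhile_cons, List.dropWhile_cons, hlt,
        decide_true, if_false, Bool.false_eq_true, ite_true]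
      rw [ih (fun z hz => hx z (by simp [hz]))]
      simp
    · have hxy : pvLt2 x y = true := by
        have : x.1 < y.1 := lt_of_le_of_ne (not_lt.mp hlt) (Ne.symm hne)
        unfold pvLt2; simp [this]
      simp [PySem.List.insertBy, hxy, hlt]

-- B's scan-and-insert splits the same way
theorem pvInsert_split (x : Int × Int) (L : List (Int × Int))
    (hx : ∀ y ∈ L, y.1 ≠ x.1) :
    L.insertIdx (pvScanIdx x L) x =
      L.takeWhile (fun y => decide (y.1 < x.1)) ++ x :: L.dropWhile (fun y => decide (y.1 < x.1)) := by
  induction L with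
  | nil => rfl
  | cons y ys ih =>
    have hne : y.1 ≠ x.1 := hx y (by simp)
    by_cases hlt : y.1 < x.1
    · have hxy : pvLtP y x = true := by unfold pvLtP; simp [hlt]
      simp only [pvScanIdx, hxy, ite_true, List.insertIdx_succ_cons, List.takeWhile_cons,
        List.dropWhile_cons, hlt, decide_true, ite_true]
      rw [ih (fun z hz => hx z (by simp [hz]))]
      simp
    · have hxy : pvLtP y x = false := by
        unfold pvLtP; simp [hlt, hne]
      simp [pvScanIdx, hxy, hlt]

-- in a key-ascending list all elements past the first non-small one have keys > x.1
theorem dropWhile_all_ge (x : Int × Int) (L : List (Int × Int))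
    (hL : L.Pairwise (fun a b => a.1 < b.1)) (hx : ∀ y ∈ L, y.1 ≠ x.1) :
    ∀ y ∈ L.dropWhile (fun y => decide (y.1 < x.1)), ¬ y.1 < x.1 := by
  induction L with
  | nil => simp
  | cons y ys ih =>
    by_cases hlt : y.1 < x.1
    · simp only [List.dropWhile_cons, hlt, decide_true, ite_true]
      exact ih hL.of_cons (fun z hz => hx z (by simp [hz]))
    · simp only [List.dropWhile_cons, hlt, decide_false, Bool.false_eq_true, ite_false]
      intro z hz
      rcases List.mem_cons.mp hz with rfl | hz
      · exact hlt
      · have hyz : y.1 < z.1 := (List.pairwise_cons.mp hL).1 z hz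
        have hyx : x.1 ≤ y.1 := not_lt.mp hlt
        exact not_lt.mpr (le_of_lt (lt_of_le_of_lt hyx hyz))

-- takeWhile / dropWhile across a "split" list: p true on all of A', false on all of B'
theorem takeWhile_split {α : Type} (p : α → Bool) (A B : List α)
    (hA : ∀ y ∈ A, p y = true) (hB : ∀ y ∈ B, p y = false) :
    (A ++ B).takeWhile p = A ∧ (A ++ B).dropWhile p = B := by
  induction A with
  | nil =>
    cases B with
    | nil => simp
    | cons b bs => simp [hB b (by simp)]
  | cons a as ih =>
    have hpa := hA a (by simp)
    have ⟨h1, h2⟩ := ih (fun z hz => hA z (by simp [hz]))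
    simp [hpa, h1, h2]

-- the core step: trimming to the last 8 commutes with one insertion step
theorem pvStep_tail8 (L : List (Int × Int)) (x : Int × Int)
    (hL : L.Pairwise (fun a b => a.1 < b.1)) (hx : ∀ y ∈ L, y.1 ≠ x.1) :
    pvStep (pvTail8 L) x = pvTail8 (PySem.List.insertBy pvLt2 x L) := by
  set p : Int × Int → Bool := fun y => decide (y.1 < x.1) with hp
  set A := L.takeWhile p with hA
  set B := L.dropWhile p with hB
  have hLAB : L = A ++ B := (List.takeWhile_append_dropWhile ..).symm
  have hpA : ∀ y ∈ A, p y = true := fun y hy => by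
    simpa using List.mem_takeWhile_imp hy
  have hpB : ∀ y ∈ B, p y = false := fun y hy => by
    have := dropWhile_all_ge x L hL hx y hy
    simp [hp, this]
  have hn : L.length = A.length + B.length := by rw [hLAB]; simp
  -- the tail8 of L splits the same way
  have htail : pvTail8 L = A.drop (L.length - 8) ++ B.drop (L.length - 8 - A.length) := by
    unfold pvTail8
    rw [hLAB, List.drop_append]
  have hA' : ∀ y ∈ A.drop (L.length - 8), p y = true :=
    fun y hy => hpA y (List.mem_of_mem_drop hy)
  have hB' : ∀ y ∈ B.drop (L.length - 8 - A.length), p y = false :=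
    fun y hy => hpB y (List.mem_of_mem_drop hy)
  have hxt : ∀ y ∈ pvTail8 L, y.1 ≠ x.1 := by
    intro y hy
    exact hx y (by unfold pvTail8 at hy; exact List.mem_of_mem_drop hy)
  -- left side: insert into the trimmed buffer, then trim once more if needed
  have hins : (pvTail8 L).insertIdx (pvScanIdx x (pvTail8 L)) x =
      A.drop (L.length - 8) ++ x :: B.drop (L.length - 8 - A.length) := by
    rw [pvInsert_split x _ hxt, htail]
    have := takeWhile_split p (A.drop (L.length - 8)) (B.drop (L.length - 8 - A.length)) hA' hB'
    rw [this.1, this.2]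
  -- right side: insert into the full sorted list, then take its last 8
  have hinsL : PySem.List.insertBy pvLt2 x L = A ++ x :: B := by
    rw [insertBy_split x L hx, ← hA, ← hB]
  rw [hinsL]
  unfold pvStep
  rw [hins]
  by_cases h8 : L.length < 8
  · -- no trimming on either side
    have hA0 : L.length - 8 = 0 := by omega
    have hlen : (A.drop (L.length - 8) ++ x :: B.drop (L.length - 8 - A.length)).length ≤ 8 := by
      simp; omega
    rw [if_neg (not_lt.mpr hlen)]
    unfold pvTail8
    have : (A ++ x :: B).length - 8 = 0 := by simp; omega
    rw [this, List.drop_zero]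
    simp [hA0]
  · -- L has more than 8 entries: both sides drop down to exactly 8
    rw [not_lt] at h8
    have hlen9 : (A.drop (L.length - 8) ++ x :: B.drop (L.length - 8 - A.length)).length = 9 := by
      simp; omega
    rw [if_pos (by omega : (A.drop (L.length - 8) ++ x :: B.drop (L.length - 8 - A.length)).length > 8)]
    unfold pvTail8
    have hlenR : (A ++ x :: B).length - 8 = L.length - 7 := by
      simp only [List.length_append, List.length_cons]; omega
    rw [hlenR, List.drop_append]
    by_cases hcase : L.length - 8 < A.length
    · -- x lands inside the kept region
      have hBz : L.length - 8 - A.length = 0 := by omega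
      have hA7 : L.length - 7 - A.length = 0 := by omega
      have hlenD : (List.drop (L.length - 8) A).length = A.length - (L.length - 8) := by simp
      have h1 : 1 - (List.drop (L.length - 8) A).length = 0 := by omega
      have h78 : L.length - 8 + 1 = L.length - 7 := by omega
      rw [hBz, h1]
      simp only [List.drop_zero]
      rw [List.drop_drop, h78, List.drop_append, hA7]
      simp only [List.drop_zero]
    · -- x ranks below the kept region: it is inserted in front and trimmed right away
      rw [not_lt] at hcase
      have hAe : A.drop (L.length - 8) = [] := List.drop_eq_nil_of_le hcase
      have hAe7 : A.drop (L.length - 7) = [] := List.drop_eq_nil_of_le (by omega)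
      have h7 : L.length - 7 - A.length = (L.length - 8 - A.length) + 1 := by omega
      simp [List.drop_append, hAe, hAe7, h7]

-- fold invariant: B's buffer is always the last 8 of the sorted prefix
theorem foldl_pvStep_eq (xs : List (Int × Int)) (h : (xs.map Prod.fst).Nodup) :
    xs.foldl pvStep [] = pvTail8 (PySem.List.sorted2 xs Prod.fst Prod.snd) := by
  induction xs using List.reverseRecOn with
  | nil => rfl
  | append_singleton p x ih =>
    have hmaps : (p.map Prod.fst).Nodup ∧ x.1 ∉ p.map Prod.fst := by
      simp only [List.map_append, List.map_cons, List.map_nil] at h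
      have h2 := List.nodup_append.mp h
      exact ⟨h2.1, fun hc => h2.2.2 x.1 hc x.1 (by simp) rfl⟩
    have hS := sorted2_eq_sorted_fst p hmaps.1
    have hperm : (PySem.List.sorted p Prod.fst).Perm p := PySem.List.sorted_perm p Prod.fst false
    have hpair : (PySem.List.sorted p Prod.fst).Pairwise (fun a b => a.1 < b.1) := by
      have hle := PySem.List.sorted_pairwise p Prod.fst
      have hnd : ((PySem.List.sorted p Prod.fst).map Prod.fst).Nodup :=
        ((hperm.map Prod.fst).nodup_iff).mpr hmaps.1
      have hne : (PySem.List.sorted p Prod.fst).Pairwise (fun a b => a.1 ≠ b.1) :=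
        List.pairwise_map.mp hnd
      exact (hle.and hne).imp (fun h => lt_of_le_of_ne h.1 h.2)
    have hxmem : ∀ y ∈ PySem.List.sorted p Prod.fst, y.1 ≠ x.1 := by
      intro y hy hc
      exact hmaps.2 (by
        rw [← hc]
        exact List.mem_map_of_mem (hperm.mem_iff.mp hy))
    have hr : PySem.List.sorted2 (p ++ [x]) Prod.fst Prod.snd =
        PySem.List.insertBy pvLt2 x (PySem.List.sorted2 p Prod.fst Prod.snd) := by
      rw [sorted2_eq_foldl, sorted2_eq_foldl, List.foldl_append, List.foldl_cons, List.foldl_nil]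
    rw [List.foldl_append, List.foldl_cons, List.foldl_nil, ih hmaps.1, hr, hS,
        pvStep_tail8 _ _ hpair hxmem]

-- ===== VERDICT (by name: the statement is the Claim_ definition above) =====
theorem format_weekly_data_py_spec : Claim_equal_format_weekly_data_py := by
  intro weekly _ hpre
  show format_weekly_data_py weekly = format_weekly_data_py_alt weekly
  unfold format_weekly_data_py format_weekly_data_py_alt
  by_cases hw : weekly = []
  · simp [hw]
  · simp only [hw, ite_false]
    rw [foldl_pvStep_eq weekly hpre]
    congr 1
    set S := PySem.List.sorted2 weekly Prod.fst Prod.snd with hSdef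
    by_cases h8 : S.length > 8
    · rw [if_pos h8, PySem.List.slice_from_neg_ofNat S 8 (by omega)]
      rfl
    · rw [if_neg h8]
      unfold pvTail8
      have : S.length - 8 = 0 := by omega
      rw [this, List.drop_zero]
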